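-- pv_equiv track=rewrite | github.com/craftor-3622/Coding_test | 4014_airstrip.py | isLongEnough
-- ===== SOURCE A (Python) =====
-- def isLongEnough(cliff_line: list, ramp_length: int) -> bool:
--     ## 오르막 경사를 검사합니다.
--     for i in range((ramp_length - 1), len(cliff_line)):
--         for j in range(i - (ramp_length - 1), i):
--             if (cliff_line[i] > 0 and cliff_line[j] != 0):
--                 return False
--     # 내리막 경사를 검사합니다.
--     for i in range(0, len(cliff_line) - (ramp_length - 1)):
--         for j in range(i + 1, i + ramp_length):
--             if (cliff_line[i] < 0 and cliff_line[j] != 0):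
--                 return False
--
--     return True
-- ===== SOURCE B (Python) =====
-- def isLongEnough(cliff_line: list, ramp_length: int) -> bool:
--     # Prefix sums of nonzero counts: each window clearance test is O(1).
--     n = len(cliff_line)
--     if ramp_length <= 1:
--         return True
--     pre = [0] * (n + 1)
--     for k in range(n):
--         pre[k + 1] = pre[k] + (1 if cliff_line[k] != 0 else 0)
--     for i in range(n):
--         v = cliff_line[i]
--         if v > 0 and i >= ramp_length - 1 and pre[i] - pre[i - ramp_length + 1] > 0:
--             return False
--         if v < 0 and i + ramp_length <= n and pre[i + ramp_length] - pre[i + 1] > 0: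
--             return False
--     return True
-- ===== Notes on version B (the rewrite author's own statement) =====
-- stated objective: alternative
-- what changed: A rescans the whole window before/after each positive/negative cell (O(n*ramp_length) worst case); B builds one prefix-sum array of nonzero counts and tests each window's clearance in O(1) in a single pass (O(n) worst case, but no early exit, so not measurably faster on inputs with an early violation).
import Mathlib
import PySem

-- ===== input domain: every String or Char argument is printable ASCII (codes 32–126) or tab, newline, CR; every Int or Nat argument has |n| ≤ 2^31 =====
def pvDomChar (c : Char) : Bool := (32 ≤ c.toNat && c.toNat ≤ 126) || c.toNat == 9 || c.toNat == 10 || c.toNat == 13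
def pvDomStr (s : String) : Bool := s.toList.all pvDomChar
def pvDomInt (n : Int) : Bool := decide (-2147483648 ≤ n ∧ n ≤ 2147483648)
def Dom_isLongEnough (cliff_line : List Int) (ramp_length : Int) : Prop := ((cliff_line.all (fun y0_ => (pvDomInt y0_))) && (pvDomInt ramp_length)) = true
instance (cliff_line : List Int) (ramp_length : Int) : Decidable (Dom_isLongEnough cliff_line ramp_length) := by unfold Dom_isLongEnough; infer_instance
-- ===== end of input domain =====

-- B replaces A's per-position inner window scans by one prefix-sum array of nonzero
-- counts, testing each window's clearance in O(1) (objective: alternative algorithm).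

-- ===== PORT A =====
-- A's nested for-loops with early `return False`: each loop is an `any` over the same
-- ranges; `pyGetD … 0` is exact here because every index A actually evaluates is in range
-- (the inner ranges are empty whenever ramp_length ≤ 1, and in range otherwise).
def isLongEnough (cliff_line : List Int) (ramp_length : Int) : Bool :=
  if (PySem.List.pyRange (ramp_length - 1) (cliff_line.length : Int) 1).any (fun i =>
       (PySem.List.pyRange (i - (ramp_length - 1)) i 1).any (fun j =>
         decide (PySem.List.pyGetD cliff_line i 0 > 0) &&
         decide (PySem.List.pyGetD cliff_line j 0 ≠ 0))) then
    false
  else if (PySem.List.pyRange 0 ((cliff_line.length : Int) - (ramp_length - 1)) 1).any (fun i =>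
       (PySem.List.pyRange (i + 1) (i + ramp_length) 1).any (fun j =>
         decide (PySem.List.pyGetD cliff_line i 0 < 0) &&
         decide (PySem.List.pyGetD cliff_line j 0 ≠ 0))) then
    false
  else
    true

-- ===== PORT B =====
-- B's first loop (running prefix sum of nonzero counts) as a structural recursion
-- carrying the running value; preList a c = [c, c+cnt a[0..0], c+cnt a[0..1], …].
def preList : List Int → Int → List Int
  | [], acc => [acc]
  | x :: xs, acc => acc :: preList xs (acc + (if x ≠ 0 then 1 else 0))

def isLongEnough_alt (cliff_line : List Int) (ramp_length : Int) : Bool :=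
  let n : Int := cliff_line.length
  if ramp_length ≤ 1 then true
  else
    let pre := preList cliff_line 0
    if (PySem.List.pyRange 0 n 1).any (fun i =>
        let v := PySem.List.pyGetD cliff_line i 0
        (decide (v > 0) && decide (ramp_length - 1 ≤ i) &&
           decide (PySem.List.pyGetD pre i 0 - PySem.List.pyGetD pre (i - ramp_length + 1) 0 > 0)) ||
        (decide (v < 0) && decide (i + ramp_length ≤ n) &&
           decide (PySem.List.pyGetD pre (i + ramp_length) 0 - PySem.List.pyGetD pre (i + 1) 0 > 0))) then
      false
    else
      true

-- ===== PRECONDITION & SPEC =====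
def Spec_isLongEnough (cliff_line : List Int) (ramp_length : Int) (out : Bool) : Prop := out = isLongEnough_alt cliff_line ramp_length
instance (cliff_line : List Int) (ramp_length : Int) (out : Bool) : Decidable (Spec_isLongEnough cliff_line ramp_length out) := by unfold Spec_isLongEnough; infer_instance

-- ===== CLAIM (what is proved, stated in full; the proofs are below) =====
def Claim_equal_isLongEnough : Prop := ∀ (cliff_line : List Int) (ramp_length : Int), Dom_isLongEnough cliff_line ramp_length → Spec_isLongEnough cliff_line ramp_length (isLongEnough cliff_line ramp_length)

-- ===== LEMMAS AND PROOFS =====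

-- pre[k] is the nonzero count of the first k elements (shifted by the accumulator).
theorem preList_getD (a : List Int) (c : Int) (k : Nat) (hk : k ≤ a.length) :
    (preList a c).getD k 0 = c + ((a.take k).countP (fun x => decide (x ≠ 0)) : Int) := by
  induction a generalizing c k with
  | nil =>
    have : k = 0 := by simpa using hk
    subst this; simp [preList]
  | cons x xs ih =>
    cases k with
    | zero => simp [preList]
    | succ k =>
      simp only [preList, List.getD_cons_succ, List.take_succ_cons, List.countP_cons]
      rw [ih _ k (by simpa using hk)]
      by_cases hx : x = 0
      · simp [hx]
      · simp [hx]; ring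

-- the prefix-sum difference is positive iff some index in [s, t) holds a nonzero entry
theorem cnt_pos_iff (a : List Int) (s t : Nat) (hst : s ≤ t) (ht : t ≤ a.length) :
    (0 < ((a.take t).countP (fun x => decide (x ≠ 0)) : Int) - ((a.take s).countP (fun x => decide (x ≠ 0)) : Int)) ↔
      ∃ j : Nat, s ≤ j ∧ j < t ∧ a.getD j 0 ≠ 0 := by
  have hsplit : a.take t = a.take s ++ (a.take t).drop s := by
    conv_lhs => rw [← List.take_append_drop s (a.take t)]
    rw [List.take_take, Nat.min_eq_left hst]
  rw [hsplit, List.countP_append]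
  have hlen : ((a.take t).drop s).length = t - s := by
    simp [Nat.min_eq_left ht]
  constructor
  · intro h
    have hpos : 0 < ((a.take t).drop s).countP (fun x => decide (x ≠ 0)) := by omega
    rw [List.countP_pos_iff] at hpos
    obtain ⟨x, hmem, hx⟩ := hpos
    obtain ⟨k, hk, hget⟩ := List.mem_iff_getElem.mp hmem
    have hsk : s + k < a.length := by omega
    have hgk : ((a.take t).drop s)[k] = a[s + k]'hsk := by
      rw [List.getElem_drop, List.getElem_take]
    refine ⟨s + k, by omega, by omega, ?_⟩
    rw [List.getD_eq_getElem a 0 hsk, ← hgk, hget]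
    simpa using hx
  · rintro ⟨j, hsj, hjt, hj⟩
    have hja : j < a.length := by omega
    have hk : j - s < ((a.take t).drop s).length := by omega
    have hgk : ((a.take t).drop s)[j - s]'hk = a[j]'hja := by
      rw [List.getElem_drop, List.getElem_take]
      congr 1; omega
    have hpos : 0 < ((a.take t).drop s).countP (fun x => decide (x ≠ 0)) := by
      rw [List.countP_pos_iff]
      refine ⟨_, List.getElem_mem hk, ?_⟩
      rw [hgk]
      rw [List.getD_eq_getElem a 0 hja] at hj
      simpa using hj
    omega

-- pyGetD at a nonnegative in-range Int index, as a Nat getD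
theorem pyGetD_toNat (a : List Int) (i : Int) (h0 : 0 ≤ i) :
    PySem.List.pyGetD a i 0 = a.getD i.toNat 0 := by
  rw [show i = ((i.toNat : Nat) : Int) by omega, PySem.List.pyGetD_natCast,
    Int.toNat_natCast]

-- pyGetD on the prefix list at an in-range index = nonzero count of the first i entries
theorem preList_pyGetD (a : List Int) (i : Int) (h0 : 0 ≤ i) (hn : i ≤ (a.length : Int)) :
    PySem.List.pyGetD (preList a 0) i 0 = ((a.take i.toNat).countP (fun x => decide (x ≠ 0)) : Int) := by
  rw [pyGetD_toNat _ _ h0, preList_getD a 0 i.toNat (by omega)]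
  ring

theorem isLongEnough_eq (a : List Int) (L : Int) :
    isLongEnough a L = isLongEnough_alt a L := by
  by_cases hL : L ≤ 1
  · -- all inner windows are empty, A's loops find nothing; B returns true directly
    have h1 : ∀ i : Int, (PySem.List.pyRange (i - (L - 1)) i 1) = [] :=
      fun i => PySem.List.pyRange_one_eq_nil (by omega)
    have h2 : ∀ i : Int, (PySem.List.pyRange (i + 1) (i + L) 1) = [] :=
      fun i => PySem.List.pyRange_one_eq_nil (by omega)
    simp [isLongEnough, isLongEnough_alt, hL, h1, h2]
  · have key :
        ((PySem.List.pyRange (L - 1) ((a.length : Int)) 1).any (fun i =>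
            (PySem.List.pyRange (i - (L - 1)) i 1).any (fun j =>
              decide (PySem.List.pyGetD a i 0 > 0) && decide (PySem.List.pyGetD a j 0 ≠ 0)))
          || (PySem.List.pyRange 0 ((a.length : Int) - (L - 1)) 1).any (fun i =>
            (PySem.List.pyRange (i + 1) (i + L) 1).any (fun j =>
              decide (PySem.List.pyGetD a i 0 < 0) && decide (PySem.List.pyGetD a j 0 ≠ 0))))
        = ((PySem.List.pyRange 0 ((a.length : Int)) 1).any (fun i =>
            let v := PySem.List.pyGetD a i 0
            (decide (v > 0) && decide (L - 1 ≤ i) &&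
               decide (PySem.List.pyGetD (preList a 0) i 0 - PySem.List.pyGetD (preList a 0) (i - L + 1) 0 > 0)) ||
            (decide (v < 0) && decide (i + L ≤ (a.length : Int)) &&
               decide (PySem.List.pyGetD (preList a 0) (i + L) 0 - PySem.List.pyGetD (preList a 0) (i + 1) 0 > 0)))) := by
      rw [Bool.eq_iff_iff]
      simp only [List.any_eq_true, PySem.List.mem_pyRange_one, Bool.or_eq_true,
        Bool.and_eq_true, decide_eq_true_eq]
      constructor
      · rintro (⟨i, ⟨hi1, hi2⟩, j, ⟨hj1, hj2⟩, hpos, hjnz⟩ | ⟨i, ⟨hi1, hi2⟩, j, ⟨hj1, hj2⟩, hneg, hjnz⟩)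
        · refine ⟨i, ⟨by omega, hi2⟩, Or.inl ⟨⟨hpos, by omega⟩, ?_⟩⟩
          rw [preList_pyGetD a i (by omega) (by omega),
              preList_pyGetD a (i - L + 1) (by omega) (by omega)]
          have := (cnt_pos_iff a (i - L + 1).toNat i.toNat (by omega) (by omega)).mpr
            ⟨j.toNat, by omega, by omega, by
              rw [pyGetD_toNat a j (by omega)] at hjnz
              exact hjnz⟩
          omega
        · refine ⟨i, ⟨hi1, by omega⟩, Or.inr ⟨⟨hneg, by omega⟩, ?_⟩⟩
          rw [preList_pyGetD a (i + L) (by omega) (by omega),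
              preList_pyGetD a (i + 1) (by omega) (by omega)]
          have := (cnt_pos_iff a (i + 1).toNat (i + L).toNat (by omega) (by omega)).mpr
            ⟨j.toNat, by omega, by omega, by
              rw [pyGetD_toNat a j (by omega)] at hjnz
              exact hjnz⟩
          omega
      · rintro ⟨i, ⟨hi1, hi2⟩, ⟨⟨hpos, hiL⟩, hc⟩ | ⟨⟨hneg, hiL⟩, hc⟩⟩
        · rw [preList_pyGetD a i (by omega) (by omega),
              preList_pyGetD a (i - L + 1) (by omega) (by omega)] at hc
          obtain ⟨j, hj1, hj2, hjnz⟩ :=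
            (cnt_pos_iff a (i - L + 1).toNat i.toNat (by omega) (by omega)).mp (by omega)
          refine Or.inl ⟨i, ⟨by omega, hi2⟩, (j : Int), ⟨by omega, by omega⟩, hpos, ?_⟩
          rw [PySem.List.pyGetD_natCast]
          exact hjnz
        · rw [preList_pyGetD a (i + L) (by omega) (by omega),
              preList_pyGetD a (i + 1) (by omega) (by omega)] at hc
          obtain ⟨j, hj1, hj2, hjnz⟩ :=
            (cnt_pos_iff a (i + 1).toNat (i + L).toNat (by omega) (by omega)).mp (by omega)
          refine Or.inr ⟨i, ⟨hi1, by omega⟩, (j : Int), ⟨by omega, by omega⟩, hneg, ?_⟩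
          rw [PySem.List.pyGetD_natCast]
          exact hjnz
    have ifb : ∀ b c : Bool, (if b = true then false else if c = true then false else true) = !(b || c) := by
      decide
    have ifb1 : ∀ c : Bool, (if c = true then false else true) = !c := by decide
    simp only [isLongEnough, isLongEnough_alt, if_neg (show ¬ L ≤ 1 by omega)]
    rw [ifb, ifb1, key]

-- ===== VERDICT (by name: the statement is the Claim_ definition above) =====
theorem isLongEnough_spec : Claim_equal_isLongEnough := by
  intro a L _
  exact isLongEnough_eq a L
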